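-- pv_equiv track=rewrite | github.com/sky068/python | 算法/binary_search.py | bsearch_last_le
-- ===== SOURCE A (Python) =====
-- from typing import List
--
-- def bsearch_last_le(arr:List[int], v):
--     low = 0
--     high = len(arr) - 1
--     while low <= high:
--         mid = low + ((high - low) >> 1)
--         if arr[mid] > v:
--             high = mid - 1
--         else:
--             if mid == len(arr) - 1 or arr[mid + 1] > v:
--                     return mid
--             else:
--                 low = mid + 1
--
--     return -1
-- ===== SOURCE B (Python) =====
-- def bsearch_last_le(arr, v):
--     for i in range(len(arr) - 1, -1, -1):
--         if arr[i] <= v: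
--             return i
--     return -1
-- ===== Notes on version B (the rewrite author's own statement) =====
-- stated objective: simpler
-- what changed: Replaces A's binary search (with its neighbor-peek and mid-loop return) by a plain backward linear scan returning the first index from the right whose element is <= v. Pre_ excludes unsorted lists with elements on both sides of v, on which A still returns but binary search is meaningless and its answer is an accident of which elements its probes happen to touch.
-- outside the precondition, e.g. on bsearch_last_le([1, -2, 0, 3, -3, 1], 0): A returns 2, B returns 4
import Mathlib
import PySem

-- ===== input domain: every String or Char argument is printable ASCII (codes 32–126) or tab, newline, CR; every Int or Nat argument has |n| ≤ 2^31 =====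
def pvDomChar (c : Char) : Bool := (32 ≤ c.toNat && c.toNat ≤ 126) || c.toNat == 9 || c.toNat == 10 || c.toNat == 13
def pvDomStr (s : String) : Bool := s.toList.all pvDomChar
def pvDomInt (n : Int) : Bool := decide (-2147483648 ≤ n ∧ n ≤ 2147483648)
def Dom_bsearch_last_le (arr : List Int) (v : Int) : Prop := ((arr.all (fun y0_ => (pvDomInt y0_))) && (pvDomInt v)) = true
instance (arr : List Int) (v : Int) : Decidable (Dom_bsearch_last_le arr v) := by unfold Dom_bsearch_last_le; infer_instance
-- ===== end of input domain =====

-- B replaces A's binary search by a plain backward linear scan (objective: simpler,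
-- not faster); equivalence is proved on sorted lists (Pre_).

-- ===== PORT A =====
-- A's while loop, transcribed with a fuel parameter that only makes it structural:
-- fuel = window size + 1 always suffices (each iteration shrinks the window), so the
-- fuel-0 arm coincides with the loop's normal exit and is never reached early.
-- The `none` arms of pyGet? are unreachable: inside the loop 0 ≤ low ≤ mid ≤ high ≤ len-1
-- (and arr[mid+1] is read only when mid ≠ len-1), so the Python never raises IndexError.
def bsearchALoop (arr : List Int) (v : Int) : Int → Int → Nat → Int
  | _low, _high, 0 => -1
  | low, high, Nat.succ n =>
    if low ≤ high then
      let mid := low + PySem.Int.floordiv (high - low) 2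
      match PySem.List.pyGet? arr mid with
      | none => -2  -- unreachable (would be IndexError)
      | some x =>
        if x > v then
          bsearchALoop arr v low (mid - 1) n
        else
          if mid = (arr.length : Int) - 1 then mid
          else
            match PySem.List.pyGet? arr (mid + 1) with
            | none => -2  -- unreachable (would be IndexError)
            | some y =>
              if y > v then mid
              else bsearchALoop arr v (mid + 1) high n
    else -1

def bsearch_last_le (arr : List Int) (v : Int) : Int :=
  bsearchALoop arr v 0 ((arr.length : Int) - 1) (arr.length + 1)

-- ===== PORT B =====
-- Source B's downward for-loop over range(len-1, -1, -1): the Nat argument n means the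
-- next index to test is n-1; reaching 0 is the loop ending without a hit.
def bscanB (arr : List Int) (v : Int) : Nat → Int
  | 0 => -1
  | Nat.succ n =>
    match PySem.List.pyGet? arr (n : Int) with
    | none => -2  -- unreachable: 0 ≤ n < len
    | some x => if x ≤ v then (n : Int) else bscanB arr v n

def bsearch_last_le_alt (arr : List Int) (v : Int) : Int :=
  bscanB arr v arr.length

-- ===== PRECONDITION & SPEC =====
-- Pre_ excludes unsorted lists with elements on both sides of v (on which A still
-- returns a value): binary search is only meaningful on sorted input, and off it A's
-- answer is an accident of which elements its probes happen to touch, which no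
-- re-implementation should match; unsorted lists lying entirely above or entirely at
-- or below v are kept, since there every search agrees (-1 resp. len-1).
def Pre_bsearch_last_le (arr : List Int) (v : Int) : Prop :=
  arr.Pairwise (· ≤ ·) ∨ (∀ x ∈ arr, v < x) ∨ (∀ x ∈ arr, x ≤ v)
instance (arr : List Int) (v : Int) : Decidable (Pre_bsearch_last_le arr v) := by
  unfold Pre_bsearch_last_le; infer_instance

def pvWitness_bsearch_last_le : List Int × Int := ([1, 2, 2, 5], 2)

def Spec_bsearch_last_le (arr : List Int) (v : Int) (out : Int) : Prop := out = bsearch_last_le_alt arr v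
instance (arr : List Int) (v : Int) (out : Int) : Decidable (Spec_bsearch_last_le arr v out) := by unfold Spec_bsearch_last_le; infer_instance

-- ===== CLAIM (what is proved, stated in full; the proofs are below) =====
def Claim_equal_bsearch_last_le : Prop := ∀ (arr : List Int) (v : Int), Dom_bsearch_last_le arr v → Pre_bsearch_last_le arr v → Spec_bsearch_last_le arr v (bsearch_last_le arr v)

-- ===== LEMMAS AND PROOFS =====

-- t = length of the ≤-v prefix; on a sorted list, arr[i] ≤ v iff i < t,
-- and both programs return t - 1.
def pvT (arr : List Int) (v : Int) : Int :=
  ((arr.takeWhile (fun x => decide (x ≤ v))).length : Int)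

lemma pvT_nonneg (arr : List Int) (v : Int) : 0 ≤ pvT arr v := by
  simp [pvT]

lemma pvT_le_len (arr : List Int) (v : Int) : pvT arr v ≤ (arr.length : Int) := by
  have := (List.takeWhile_prefix (l := arr) (fun x => decide (x ≤ v))).length_le
  simp only [pvT]
  exact_mod_cast this

lemma pvT_cons (x : Int) (xs : List Int) (v : Int) :
    pvT (x :: xs) v = if x ≤ v then pvT xs v + 1 else 0 := by
  by_cases h : x ≤ v <;> simp [pvT, h]

lemma pvT_all_gt (arr : List Int) (v : Int) (h : ∀ x ∈ arr, v < x) : pvT arr v = 0 := by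
  cases arr with
  | nil => simp [pvT]
  | cons x xs =>
    have hx : ¬ x ≤ v := by have := h x (List.mem_cons_self); omega
    simp [pvT, List.takeWhile_cons, hx]

lemma pvT_all_le (arr : List Int) (v : Int) (h : ∀ x ∈ arr, x ≤ v) : pvT arr v = (arr.length : Int) := by
  induction arr with
  | nil => simp [pvT]
  | cons x xs ih =>
    have hx : x ≤ v := h x (List.mem_cons_self)
    have := ih (fun y hy => h y (List.mem_cons_of_mem x hy))
    rw [pvT_cons, if_pos hx, this]
    simp

lemma pvKey (arr : List Int) (v : Int) (hs : arr.Pairwise (· ≤ ·)) :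
    ∀ i : Nat, (hi : i < arr.length) → (arr[i] ≤ v ↔ (i : Int) < pvT arr v) := by
  induction arr with
  | nil => intro i hi; simp at hi
  | cons x xs ih =>
    rcases List.pairwise_cons.mp hs with ⟨hx, hxs⟩
    intro i hi
    rw [pvT_cons]
    by_cases hxv : x ≤ v
    · rw [if_pos hxv]
      have hnn := pvT_nonneg xs v
      cases i with
      | zero =>
        simp only [List.getElem_cons_zero, Nat.cast_zero]
        constructor
        · intro _; omega
        · intro _; exact hxv
      | succ j =>
        have hj : j < xs.length := by simpa using hi
        have hIH := ih hxs j hj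
        simp only [List.getElem_cons_succ]
        rw [hIH]
        push_cast
        omega
    · rw [if_neg hxv]
      cases i with
      | zero =>
        simp only [List.getElem_cons_zero, Nat.cast_zero]
        constructor
        · intro h; exact absurd h hxv
        · intro h; omega
      | succ j =>
        have hj : j < xs.length := by simpa using hi
        have hxj : x ≤ xs[j] := hx _ (List.getElem_mem hj)
        simp only [List.getElem_cons_succ]
        constructor
        · intro h; omega
        · intro h; push_cast at h; omega

lemma pvGet (arr : List Int) (i : Int) (h0 : 0 ≤ i) (h1 : i < (arr.length : Int)) :
    PySem.List.pyGet? arr i = some (arr[i.toNat]'(by omega)) := by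
  exact PySem.List.pyGet?_eq_some_getElem arr h0 (by exact_mod_cast h1)

lemma bscanB_eq (arr : List Int) (v : Int)
    (key : ∀ i : Nat, (hi : i < arr.length) → (arr[i] ≤ v ↔ (i : Int) < pvT arr v)) :
    ∀ n : Nat, n ≤ arr.length →
      bscanB arr v n = min (n : Int) (pvT arr v) - 1 := by
  intro n
  induction n with
  | zero =>
    intro _
    rw [bscanB]
    have := pvT_nonneg arr v
    omega
  | succ m ih =>
    intro hm
    rw [bscanB]
    have hget : PySem.List.pyGet? arr (m : Int) = some (arr[m]'(by omega)) := by
      simpa using pvGet arr (m : Int) (by omega) (by push_cast; omega)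
    rw [hget]
    have hk := key m (by omega)
    by_cases hc : arr[m]'(by omega) ≤ v
    · simp only [hc, if_pos]
      have := hk.mp hc
      omega
    · simp only [hc, if_neg, not_false_iff]
      have ht : pvT arr v ≤ (m : Int) := by
        by_contra hcon
        exact hc (hk.mpr (by omega))
      rw [ih (by omega)]
      omega

lemma bsearchALoop_eq (arr : List Int) (v : Int)
    (key : ∀ i : Nat, (hi : i < arr.length) → (arr[i] ≤ v ↔ (i : Int) < pvT arr v)) :
    ∀ (n : Nat) (low high : Int), high + 1 - low < (n : Int) →
      0 ≤ low → high ≤ (arr.length : Int) - 1 →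
      low ≤ pvT arr v → pvT arr v ≤ high + 1 → (low = 0 ∨ low < pvT arr v) →
      bsearchALoop arr v low high n = pvT arr v - 1 := by
  intro n
  induction n with
  | zero =>
    intro low high hn h0 h1 h2 h3 h4
    rw [bsearchALoop]
    omega
  | succ m ih =>
    intro low high hn h0 h1 h2 h3 h4
    rw [bsearchALoop]
    by_cases hlh : low ≤ high
    · simp only [hlh, if_pos]
      set mid := low + PySem.Int.floordiv (high - low) 2 with hmid
      have hd := PySem.Int.floordiv_eq_ediv_of_pos (a := high - low) (b := 2) (by omega)
      have hb : low ≤ mid ∧ mid ≤ high := by rw [hmid, hd]; omega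
      have hget := pvGet arr mid (by omega) (by omega)
      rw [hget]
      have hcast : ((mid.toNat : Nat) : Int) = mid := by omega
      have hk := key mid.toNat (by omega)
      rw [hcast] at hk
      by_cases hc : arr[mid.toNat]'(by omega) > v
      · simp only [hc, if_pos]
        have hmt : pvT arr v ≤ mid := by
          by_contra hcon
          have := hk.mpr (by omega)
          omega
        exact ih low (mid - 1) (by push_cast at hn ⊢; omega) h0 (by omega) h2 (by omega) h4
      · simp only [hc, if_neg, not_false_iff]
        have hle : arr[mid.toNat]'(by omega) ≤ v := by omega
        have hmt : mid < pvT arr v := hk.mp hle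
        by_cases hlast : mid = (arr.length : Int) - 1
        · simp only [hlast, if_pos]
          have := pvT_le_len arr v
          omega
        · simp only [hlast, if_neg, not_false_iff]
          have hget1 := pvGet arr (mid + 1) (by omega) (by omega)
          rw [hget1]
          have hcast1 : (((mid + 1).toNat : Nat) : Int) = mid + 1 := by omega
          have hk1 := key (mid + 1).toNat (by omega)
          rw [hcast1] at hk1
          by_cases hc1 : arr[(mid + 1).toNat]'(by omega) > v
          · simp only [hc1, if_pos]
            have : pvT arr v ≤ mid + 1 := by
              by_contra hcon
              have := hk1.mpr (by omega)
              omega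
            omega
          · simp only [hc1, if_neg, not_false_iff]
            have hle1 : arr[(mid + 1).toNat]'(by omega) ≤ v := by omega
            have : mid + 1 < pvT arr v := hk1.mp hle1
            exact ih (mid + 1) high (by push_cast at hn ⊢; omega) (by omega) h1 (by omega) h3 (by omega)
    · simp only [hlh, if_neg, not_false_iff]
      omega

-- ===== VERDICT (by name: the statement is the Claim_ definition above) =====
theorem bsearch_last_le_spec : Claim_equal_bsearch_last_le := by
  intro arr v _hdom hpre
  unfold Spec_bsearch_last_le bsearch_last_le bsearch_last_le_alt
  have key : ∀ i : Nat, (hi : i < arr.length) → (arr[i] ≤ v ↔ (i : Int) < pvT arr v) := by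
    rcases hpre with hs | h1 | h2
    · exact pvKey arr v hs
    · intro i hi
      have hx := h1 _ (List.getElem_mem hi)
      rw [pvT_all_gt arr v h1]
      constructor
      · intro h; omega
      · intro h; omega
    · intro i hi
      have hx := h2 _ (List.getElem_mem hi)
      rw [pvT_all_le arr v h2]
      constructor
      · intro _; exact_mod_cast hi
      · intro _; exact hx
  have hA := bsearchALoop_eq arr v key (arr.length + 1) 0
      ((arr.length : Int) - 1) (by push_cast; omega) (le_refl 0) (le_refl _)
      (pvT_nonneg arr v) (by have := pvT_le_len arr v; omega) (Or.inl rfl)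
  have hB := bscanB_eq arr v key arr.length (le_refl _)
  rw [hA, hB]
  have := pvT_le_len arr v
  omega
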